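-- pv_equiv track=rewrite | github.com/unosarta/waldo | modules.py | scinot
-- ===== SOURCE A (Python) =====
-- def scinot(string):
-- 	"""Takes a string in MCNP scientific notation (without 'E' character), and returns a string of standard scientific notation."""
-- 	"""If there is no '+' or '-' character in string, returns it as it is."""
-- 	"""If the argument is not string, returns the argument"""
-- 	if type(string) != str:
-- 		return string
-- 	else:
-- 		retstr = string[0]
-- 		for char in string[1:]:
-- 			if ((char == '-')|(char == '+')):
-- 				retstr += 'E' + char
-- 			else:
-- 				retstr += char
--
-- 		return retstr
-- ===== SOURCE B (Python) =====
-- def scinot(string):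
--     """Insert 'E' before every '+' or '-' except in the first position."""
--     if type(string) != str:
--         return string
--     return string[0] + string[1:].replace('+', 'E+').replace('-', 'E-')
-- ===== Notes on version B (the rewrite author's own statement) =====
-- stated objective: idiomatic
-- what changed: Replaces A's single per-character accumulator loop (branching on each char) by two staged str.replace passes over string[1:] ('+' -> 'E+', then '-' -> 'E-'), prefixed by the untouched first character.
import Mathlib
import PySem

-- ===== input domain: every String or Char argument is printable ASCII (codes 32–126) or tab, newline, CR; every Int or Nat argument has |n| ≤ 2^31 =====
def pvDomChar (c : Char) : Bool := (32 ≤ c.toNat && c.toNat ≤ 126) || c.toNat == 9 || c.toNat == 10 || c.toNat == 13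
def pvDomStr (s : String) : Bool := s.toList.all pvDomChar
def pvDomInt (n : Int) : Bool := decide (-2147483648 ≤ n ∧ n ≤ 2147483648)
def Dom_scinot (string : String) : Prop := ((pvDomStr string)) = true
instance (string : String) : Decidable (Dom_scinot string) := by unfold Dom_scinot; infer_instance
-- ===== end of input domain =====

-- B replaces A's single per-character accumulator loop by two staged replace passes
-- ('+' -> "E+", then '-' -> "E-") over string[1:]. Objective: idiomatic. Both raise
-- IndexError on "" (string[0]), excluded by Pre_.

-- ===== PORT A =====
-- A's loop: retstr starts as string[0]; each char of string[1:] appends 'E'+char or char.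
def scinotLoop (retstr : List Char) (chars : List Char) : List Char :=
  chars.foldl (fun acc ch =>
    if ch = '-' ∨ ch = '+' then acc ++ ['E', ch] else acc ++ [ch]) retstr

def scinot (string : String) : String :=
  match string.toList with
  | [] => ""   -- Python raises IndexError here; outside Pre_
  | c :: rest => String.mk (scinotLoop [c] rest)

-- ===== PORT B =====
-- .replace('+', 'E+'): single-character pattern, so exact as a structural recursion.
def repPlus : List Char → List Char
  | [] => []
  | c :: cs => if c = '+' then 'E' :: '+' :: repPlus cs else c :: repPlus cs

-- .replace('-', 'E-'): second staged pass.
def repMinus : List Char → List Char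
  | [] => []
  | c :: cs => if c = '-' then 'E' :: '-' :: repMinus cs else c :: repMinus cs

def scinot_alt (string : String) : String :=
  match string.toList with
  | [] => ""   -- string[0] raises in Python; outside Pre_
  | c :: rest => String.mk (c :: repMinus (repPlus rest))

-- ===== PRECONDITION & SPEC =====
-- Pre_ excludes only the empty string, where A (and B) raise IndexError on string[0].
def Pre_scinot (string : String) : Prop := string ≠ ""
instance (string : String) : Decidable (Pre_scinot string) := by unfold Pre_scinot; infer_instance
def pvWitness_scinot : String := "1.23+4"

def Spec_scinot (string : String) (out : String) : Prop := out = scinot_alt string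
instance (string : String) (out : String) : Decidable (Spec_scinot string out) := by unfold Spec_scinot; infer_instance

-- ===== CLAIM =====
def Claim_equal_scinot : Prop := ∀ (string : String), Dom_scinot string → Pre_scinot string → Spec_scinot string (scinot string)

-- ===== LEMMAS AND PROOFS =====
theorem scinotLoop_eq_reps (chars acc : List Char) :
    scinotLoop acc chars = acc ++ repMinus (repPlus chars) := by
  induction chars generalizing acc with
  | nil => simp [scinotLoop, repPlus, repMinus]
  | cons c cs ih =>
    simp only [scinotLoop, List.foldl_cons] at *
    by_cases hp : c = '+'
    · subst hp; simp [repPlus, repMinus, ih]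
    · by_cases hm : c = '-'
      · subst hm; simp [repPlus, repMinus, ih]
      · simp [repPlus, repMinus, hp, hm, ih]

-- ===== VERDICT =====
theorem scinot_spec : Claim_equal_scinot := by
  intro string _ _
  unfold Spec_scinot scinot scinot_alt
  cases h : string.toList with
  | nil => rfl
  | cons c rest => simp [scinotLoop_eq_reps]
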